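-- pv_equiv track=rewrite | github.com/tuomashi20/wikicode | src/skills/code_tools.py | _collect_block_new_content
-- ===== SOURCE A (Python) =====
-- def _collect_block_new_content(block_text: str) -> tuple[bool, str]:
--     lines = block_text.splitlines()
--     hunk_starts = [i for i, ln in enumerate(lines) if ln.startswith("@@")]
--     if not hunk_starts:
--         return False, "No hunk found in diff."
--     out: list[str] = []
--     for hs_i, hs in enumerate(hunk_starts):
--         next_hs = hunk_starts[hs_i + 1] if hs_i + 1 < len(hunk_starts) else len(lines)
--         hunk_lines = lines[hs + 1 : next_hs]
--         for hl in hunk_lines: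
--             if hl.startswith("\\ No newline at end of file"):
--                 continue
--             if not hl:
--                 out.append("")
--                 continue
--             marker, payload = hl[0], hl[1:]
--             if marker in {" ", "+"}:
--                 out.append(payload)
--             elif marker == "-":
--                 continue
--             else:
--                 return False, f"Unsupported diff line: {hl[:80]}"
--     return True, "\n".join(out)
-- ===== SOURCE B (Python) =====
-- def _collect_block_new_content(block_text: str) -> tuple[bool, str]:
--     out: list[str] = []
--     in_hunk = False
--     for ln in block_text.splitlines():
--         if ln.startswith("@@"):
--             in_hunk = True
--             continue
--         if not in_hunk:
--             continue
--         if ln.startswith("\\ No newline at end of file"):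
--             continue
--         if not ln:
--             out.append("")
--             continue
--         marker, payload = ln[0], ln[1:]
--         if marker in {" ", "+"}:
--             out.append(payload)
--         elif marker == "-":
--             continue
--         else:
--             return False, f"Unsupported diff line: {ln[:80]}"
--     if not in_hunk:
--         return False, "No hunk found in diff."
--     return True, "\n".join(out)
-- ===== Notes on version B (the rewrite author's own statement) =====
-- stated objective: simpler
-- what changed: Replaces the precomputed hunk-start index list, nested enumerate loop and per-hunk slicing with a single linear pass over the lines carrying an in_hunk flag.
import Mathlib
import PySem

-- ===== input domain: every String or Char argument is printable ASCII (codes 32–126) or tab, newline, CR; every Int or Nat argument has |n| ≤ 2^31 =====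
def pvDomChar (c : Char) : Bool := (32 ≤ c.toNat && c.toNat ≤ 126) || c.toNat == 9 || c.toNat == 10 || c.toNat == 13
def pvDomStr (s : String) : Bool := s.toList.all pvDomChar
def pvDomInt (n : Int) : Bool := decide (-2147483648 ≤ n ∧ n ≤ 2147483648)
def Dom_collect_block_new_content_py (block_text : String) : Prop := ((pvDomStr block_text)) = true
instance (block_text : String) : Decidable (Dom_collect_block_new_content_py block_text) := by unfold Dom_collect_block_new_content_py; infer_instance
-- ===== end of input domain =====

-- B replaces A's precomputed hunk-start index list, nested loop and per-hunk slicing by one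
-- linear pass over the lines with an in_hunk flag (objective: simpler; same return value).

-- ===== PORT A =====
-- shared per-line body: both Pythons contain this identical per-line logic verbatim
-- (the '\ No newline' test, the empty-line append, marker/payload split, the error return)
def pvPerLine (hl : String) (out : List String) : Except String (List String) :=
  if PySem.Str.startswith hl "\\ No newline at end of file" then .ok out
  else
    match hl.toList with
    | [] => .ok (out ++ [""])                       -- 'if not hl: out.append("")'
    | c :: cs =>                                    -- marker, payload = hl[0], hl[1:]
      if c = ' ' ∨ c = '+' then .ok (out ++ [String.ofList cs])
      else if c = '-' then .ok out
      else .error ("Unsupported diff line: " ++ PySem.Str.slice hl none (some 80))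

-- inner 'for hl in hunk_lines' loop of A (early return = .error)
def pvGoA : List String → List String → Except String (List String)
  | [], out => .ok out
  | hl :: rest, out =>
    match pvPerLine hl out with
    | .error e => .error e
    | .ok out' => pvGoA rest out'

-- '[i for i, ln in enumerate(lines) if ln.startswith("@@")]'
def pvIdxs (lines : List String) : List Int :=
  (PySem.List.enumerate lines 0).filterMap
    (fun p => if PySem.Str.startswith p.2 "@@" then some p.1 else none)

-- outer 'for hs_i, hs in enumerate(hunk_starts)' loop; the rest of the list plays
-- the role of hunk_starts[hs_i + 1:], so its head is 'hunk_starts[hs_i + 1]'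
def pvHunksA (lines : List String) : List Int → List String → Except String (List String)
  | [], out => .ok out
  | hs :: rest, out =>
    let next_hs : Int := match rest with | [] => (lines.length : Int) | h :: _ => h
    match pvGoA (PySem.List.slice lines (some (hs + 1)) (some next_hs)) out with
    | .error e => .error e
    | .ok out' => pvHunksA lines rest out'

def collect_block_new_content_py (block_text : String) : Bool × String :=
  let lines := PySem.Str.splitlines block_text
  let hunk_starts := pvIdxs lines
  if hunk_starts = [] then (false, "No hunk found in diff.")
  else
    match pvHunksA lines hunk_starts [] with
    | .error e => (false, e)
    | .ok out => (true, PySem.Str.join "\n" out)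

-- ===== PORT B =====
-- single pass with the in_hunk flag; returns the flag's final value with the output
def pvGoB : List String → Bool → List String → Except String (Bool × List String)
  | [], in_hunk, out => .ok (in_hunk, out)
  | ln :: rest, in_hunk, out =>
    if PySem.Str.startswith ln "@@" then pvGoB rest true out
    else if in_hunk = false then pvGoB rest in_hunk out
    else
      match pvPerLine ln out with
      | .error e => .error e
      | .ok out' => pvGoB rest in_hunk out'

def collect_block_new_content_py_alt (block_text : String) : Bool × String :=
  match pvGoB (PySem.Str.splitlines block_text) false [] with
  | .error e => (false, e)
  | .ok (false, _) => (false, "No hunk found in diff.")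
  | .ok (true, out) => (true, PySem.Str.join "\n" out)

-- ===== PRECONDITION & SPEC =====
def Spec_collect_block_new_content_py (block_text : String) (out : Bool × String) : Prop := out = collect_block_new_content_py_alt block_text
instance (block_text : String) (out : Bool × String) : Decidable (Spec_collect_block_new_content_py block_text out) := by unfold Spec_collect_block_new_content_py; infer_instance

-- ===== CLAIM (what is proved, stated in full; the proofs are below) =====
def Claim_equal_collect_block_new_content_py : Prop := ∀ (block_text : String), Dom_collect_block_new_content_py block_text → Spec_collect_block_new_content_py block_text (collect_block_new_content_py block_text)

-- ===== LEMMAS AND PROOFS =====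

def pvHdr (l : String) : Bool := PySem.Str.startswith l "@@"

-- Nat-valued version of pvIdxs, structural in the line list
def pvIdxN : List String → List Nat
  | [] => []
  | l :: ls => if pvHdr l then 0 :: (pvIdxN ls).map (· + 1) else (pvIdxN ls).map (· + 1)

-- Nat-index version of pvHunksA with the slice written as drop/take
def pvHunksN (lines : List String) : List Nat → List String → Except String (List String)
  | [], out => .ok out
  | hs :: rest, out =>
    let next : Nat := match rest with | [] => lines.length | h :: _ => h
    match pvGoA ((lines.drop (hs + 1)).take (next - (hs + 1))) out with
    | .error e => .error e
    | .ok out' => pvHunksN lines rest out'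

-- common semantics: process every line, skipping '@@' headers
def pvE : List String → List String → Except String (List String)
  | [], out => .ok out
  | l :: ls, out =>
    if pvHdr l then pvE ls out
    else
      match pvPerLine l out with
      | .error e => .error e
      | .ok out' => pvE ls out'

theorem pvIdxs_enum_cast (ls : List String) : ∀ (n : Nat),
    (PySem.List.enumerate ls (n : Int)).filterMap
      (fun p => if PySem.Str.startswith p.2 "@@" then some p.1 else none)
      = (pvIdxN ls).map (fun (k : Nat) => ((k : Int) + (n : Int))) := by
  induction ls with
  | nil => intro n; simp [PySem.List.enumerate_nil, pvIdxN]
  | cons l ls ih =>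
    intro n
    have h1 : ((n : Int) + 1) = ((n + 1 : Nat) : Int) := by push_cast; ring
    rw [PySem.List.enumerate_cons, List.filterMap_cons, h1, ih (n + 1)]
    by_cases h : PySem.Str.startswith l "@@"
    · simp only [pvIdxN, pvHdr, h, if_pos, List.map_cons, List.map_map]
      congr 1
      · push_cast; ring
      apply List.map_congr_left; intro k _; simp only [Function.comp_apply]; push_cast; ring
    · simp only [pvIdxN, pvHdr, h, Bool.false_eq_true, if_false, List.map_map]
      apply List.map_congr_left; intro k _; simp only [Function.comp_apply]; push_cast; ring

theorem pvIdxs_eq (ls : List String) : pvIdxs ls = (pvIdxN ls).map (fun (k : Nat) => (k : Int)) := by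
  have h := pvIdxs_enum_cast ls 0
  rw [pvIdxs]
  simp only [Nat.cast_zero, add_zero] at h
  exact h

theorem pvHunksA_cast (lines : List String) : ∀ (ns : List Nat) (out : List String),
    pvHunksA lines (ns.map (fun (k : Nat) => (k : Int))) out = pvHunksN lines ns out := by
  intro ns
  induction ns with
  | nil => intro out; rfl
  | cons hs rest ih =>
    intro out
    cases rest with
    | nil =>
      simp only [List.map_cons, List.map_nil, pvHunksA, pvHunksN]
      rw [show ((hs : Int) + 1) = ((hs + 1 : Nat) : Int) by push_cast; ring]
      rw [show ((lines.length : Int)) = ((lines.length : Nat) : Int) by norm_num]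
      rw [PySem.List.slice_natCast]
    | cons h2 rest2 =>
      simp only [List.map_cons, pvHunksA, pvHunksN]
      have hslice : PySem.List.slice lines (some ((hs : Int) + 1)) (some ((h2 : Nat) : Int))
          = (lines.drop (hs + 1)).take (h2 - (hs + 1)) := by
        rw [show ((hs : Int) + 1) = ((hs + 1 : Nat) : Int) by push_cast; ring,
          PySem.List.slice_natCast]
      rw [hslice]
      cases pvGoA ((lines.drop (hs + 1)).take (h2 - (hs + 1))) out with
      | error e => rfl
      | ok out' => exact ih out'

theorem pvHunksN_shift (l : String) (ls : List String) : ∀ (ns : List Nat) (out : List String),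
    pvHunksN (l :: ls) (ns.map (· + 1)) out = pvHunksN ls ns out := by
  intro ns
  induction ns with
  | nil => intro out; rfl
  | cons hs rest ih =>
    intro out
    cases rest with
    | nil =>
      simp only [List.map_cons, List.map_nil, pvHunksN, List.length_cons, List.drop_succ_cons]
      have : ls.length + 1 - (hs + 1 + 1) = ls.length - (hs + 1) := by omega
      rw [this]
    | cons h2 rest2 =>
      simp only [List.map_cons, pvHunksN, List.drop_succ_cons]
      have : h2 + 1 - (hs + 1 + 1) = h2 - (hs + 1) := by omega
      rw [this]
      cases pvGoA ((ls.drop (hs + 1)).take (h2 - (hs + 1))) out with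
      | error e => rfl
      | ok out' => exact ih out'

theorem pvIdxN_nil_iff (ls : List String) : pvIdxN ls = [] ↔ ∀ l ∈ ls, pvHdr l = false := by
  induction ls with
  | nil => simp [pvIdxN]
  | cons l ls ih =>
    simp only [pvIdxN]
    by_cases h : pvHdr l
    · simp [h]
    · simp [h, ih]

theorem pvE_no_hdr : ∀ (ls : List String) (out : List String),
    (∀ l ∈ ls, pvHdr l = false) → pvE ls out = pvGoA ls out := by
  intro ls
  induction ls with
  | nil => intro out _; rfl
  | cons l ls ih =>
    intro out h
    have hl : pvHdr l = false := h l (by simp)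
    simp only [pvE, pvGoA, hl, Bool.false_eq_true, if_false]
    cases pvPerLine l out with
    | error e => rfl
    | ok out' => exact ih out' (fun x hx => h x (by simp [hx]))

theorem pvE_first_idx : ∀ (ls : List String) (i : Nat) (r : List Nat) (out : List String),
    pvIdxN ls = i :: r →
    pvE ls out = (match pvGoA (ls.take i) out with
      | .error e => .error e
      | .ok out' => pvE (ls.drop (i + 1)) out') := by
  intro ls
  induction ls with
  | nil => intro i r out h; simp [pvIdxN] at h
  | cons l ls ih =>
    intro i r out h
    by_cases hl : pvHdr l
    · simp only [pvIdxN, hl, if_pos] at h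
      have hi : i = 0 := by
        have := List.head_eq_of_cons_eq h.symm
        omega
      subst hi
      simp [pvE, hl, pvGoA]
    · simp only [pvIdxN, hl, Bool.false_eq_true, if_false] at h
      obtain ⟨i', r', hio, hi⟩ : ∃ i' r', pvIdxN ls = i' :: r' ∧ i = i' + 1 := by
        cases hix : pvIdxN ls with
        | nil => rw [hix] at h; simp at h
        | cons a b =>
          rw [hix] at h
          simp only [List.map_cons] at h
          exact ⟨a, b, rfl, List.head_eq_of_cons_eq h.symm⟩
      subst hi
      simp only [pvE, hl, Bool.false_eq_true, if_false, List.take_succ_cons, pvGoA,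
        List.drop_succ_cons]
      cases hp : pvPerLine l out with
      | error e => rfl
      | ok out' => exact ih i' r' out' hio

theorem pvHunksN_cons (lines : List String) (hs : Nat) (rest : List Nat) (out : List String) :
    pvHunksN lines (hs :: rest) out
      = (match pvGoA ((lines.drop (hs + 1)).take
            ((match rest with | [] => lines.length | h :: _ => h) - (hs + 1))) out with
         | .error e => .error e
         | .ok out' => pvHunksN lines rest out') := rfl

theorem pvMainA : ∀ (ls : List String) (out : List String),
    pvHunksN ls (pvIdxN ls) out = (match pvIdxN ls with
      | [] => .ok out
      | i :: _ => pvE (ls.drop (i + 1)) out) := by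
  intro ls
  induction ls with
  | nil => intro out; simp [pvIdxN, pvHunksN]
  | cons l ls ih =>
    intro out
    by_cases hl : pvHdr l
    · have hpx : pvIdxN (l :: ls) = 0 :: (pvIdxN ls).map (· + 1) := by simp [pvIdxN, hl]
      rw [hpx]
      cases hix : pvIdxN ls with
      | nil =>
        have hnoh : ∀ x ∈ ls, pvHdr x = false := (pvIdxN_nil_iff ls).1 hix
        rw [List.map_nil, pvHunksN_cons]
        have htk : ((l :: ls).drop (0 + 1)).take ((l :: ls).length - (0 + 1)) = ls := by simp
        rw [htk]
        show (match pvGoA ls out with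
          | .error e => .error e
          | .ok out' => pvHunksN (l :: ls) [] out') = pvE ls out
        rw [pvE_no_hdr ls out hnoh]
        cases pvGoA ls out <;> rfl
      | cons i rest =>
        rw [List.map_cons, pvHunksN_cons]
        have htk : ((l :: ls).drop (0 + 1)).take
            ((match (i + 1) :: rest.map (· + 1) with
              | [] => (l :: ls).length | h :: _ => h) - (0 + 1)) = ls.take i := by simp
        rw [htk]
        show (match pvGoA (ls.take i) out with
          | .error e => .error e
          | .ok out' => pvHunksN (l :: ls) ((i + 1) :: rest.map (· + 1)) out') = pvE ls out
        rw [pvE_first_idx ls i rest out hix]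
        cases pvGoA (ls.take i) out with
        | error e => rfl
        | ok out' =>
          show pvHunksN (l :: ls) ((i + 1) :: rest.map (· + 1)) out'
            = pvE (ls.drop (i + 1)) out'
          have hsh := pvHunksN_shift l ls (i :: rest) out'
          simp only [List.map_cons] at hsh
          rw [hsh, ← hix, ih out', hix]
    · have hpx : pvIdxN (l :: ls) = (pvIdxN ls).map (· + 1) := by simp [pvIdxN, hl]
      rw [hpx, pvHunksN_shift, ih out]
      cases hix : pvIdxN ls with
      | nil => simp
      | cons i rest => simp

theorem pvMainB : ∀ (ls : List String) (out : List String),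
    pvGoB ls true out = (match pvE ls out with
      | .error e => .error e
      | .ok out' => .ok (true, out')) := by
  intro ls
  induction ls with
  | nil => intro out; rfl
  | cons l ls ih =>
    intro out
    by_cases hl : pvHdr l
    · have hl' : PySem.Str.startswith l "@@" = true := hl
      simp only [pvGoB, pvE, hl', if_pos, hl]
      exact ih out
    · have hl' : ¬ PySem.Str.startswith l "@@" = true := by simpa [pvHdr] using hl
      have hl'' : pvHdr l = false := by simpa [pvHdr] using hl
      simp only [pvGoB, pvE, hl', hl'', Bool.false_eq_true, if_false,
        Bool.true_eq_false]
      cases pvPerLine l out with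
      | error e => rfl
      | ok out' => exact ih out'

theorem pvTop : ∀ (lines : List String),
    (if pvIdxN lines = [] then ((false, "No hunk found in diff.") : Bool × String)
     else match pvHunksN lines (pvIdxN lines) [] with
       | .error e => (false, e)
       | .ok out => (true, PySem.Str.join "\n" out))
    = (match pvGoB lines false [] with
       | .error e => (false, e)
       | .ok (false, _) => (false, "No hunk found in diff.")
       | .ok (true, out) => (true, PySem.Str.join "\n" out)) := by
  intro lines
  induction lines with
  | nil => rfl
  | cons l ls ih =>
    by_cases hl : pvHdr l
    · have hl' : PySem.Str.startswith l "@@" = true := hl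
      have hne : pvIdxN (l :: ls) ≠ [] := by simp [pvIdxN, hl]
      rw [if_neg hne, pvMainA (l :: ls) []]
      have hpx : pvIdxN (l :: ls) = 0 :: (pvIdxN ls).map (· + 1) := by simp [pvIdxN, hl]
      rw [hpx]
      show (match pvE ls [] with
        | .error e => ((false, e) : Bool × String)
        | .ok out => (true, PySem.Str.join "\n" out))
        = _
      simp only [pvGoB, hl', if_pos]
      rw [pvMainB ls []]
      cases pvE ls [] with
      | error e => rfl
      | ok out => rfl
    · have hl' : ¬ PySem.Str.startswith l "@@" = true := by simpa [pvHdr] using hl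
      have hix : pvIdxN (l :: ls) = (pvIdxN ls).map (· + 1) := by simp [pvIdxN, hl]
      have hnil : (pvIdxN (l :: ls) = []) ↔ (pvIdxN ls = []) := by rw [hix]; simp
      simp only [pvGoB, hl', Bool.false_eq_true, if_false, if_true]
      rw [← ih]
      by_cases hc : pvIdxN ls = []
      · rw [if_pos (hnil.2 hc), if_pos hc]
      · rw [if_neg (fun h => hc (hnil.1 h)), if_neg hc]
        rw [hix, pvHunksN_shift l ls (pvIdxN ls) []]

-- ===== VERDICT (by name: the statement is the Claim_ definition above) =====
theorem collect_block_new_content_py_spec : Claim_equal_collect_block_new_content_py := by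
  unfold Claim_equal_collect_block_new_content_py
  intro block_text _
  unfold Spec_collect_block_new_content_py
  unfold collect_block_new_content_py collect_block_new_content_py_alt
  rw [← pvTop (PySem.Str.splitlines block_text)]
  show (if pvIdxs (PySem.Str.splitlines block_text) = []
      then ((false, "No hunk found in diff.") : Bool × String)
      else match pvHunksA (PySem.Str.splitlines block_text)
            (pvIdxs (PySem.Str.splitlines block_text)) [] with
        | .error e => (false, e)
        | .ok out => (true, PySem.Str.join "\n" out)) = _
  rw [pvIdxs_eq (PySem.Str.splitlines block_text)]
  by_cases hc : pvIdxN (PySem.Str.splitlines block_text) = []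
  · rw [hc]; simp
  · have h1 : (pvIdxN (PySem.Str.splitlines block_text)).map (fun (k : Nat) => (k : Int)) ≠ [] := by
      simpa using hc
    rw [if_neg h1, if_neg hc,
      pvHunksA_cast (PySem.Str.splitlines block_text) (pvIdxN (PySem.Str.splitlines block_text)) []]
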